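-- pv_equiv track=rewrite | github.com/sieukim/algorithm-programmers | level0/ex10.py | solution
-- ===== SOURCE A (Python) =====
-- def solution(keyinput, board):
--     move = {
--         'up': [0, 1],
--         'down': [0, -1],
--         'left': [-1, 0],
--         'right': [1, 0],
--     }
--
--     # board 범위
--     n, m = (board[0]-1)//2, (board[1]-1)//2
--     # 현재 좌표
--     x, y = 0, 0
--
--     for key in keyinput:
--         # 이동량
--         dx, dy = move[key]
--         # 다음 좌표
--         nx, ny = x+dx, y+dy
--         # 범위 확인
--         if nx not in range(-n, n+1):
--             continue
--         if ny not in range(-m, m+1):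
--             continue
--         # 좌표 갱신
--         x, y = nx,ny
--
--     return x, y
-- ===== SOURCE B (Python) =====
-- def solution(keyinput, board):
--     # The two axes are independent: fold the horizontal and vertical key
--     # subsequences separately with the same in-bounds-or-skip guard.
--     n = (board[0] - 1) // 2
--     m = (board[1] - 1) // 2
--     if n < 0 or m < 0:
--         # empty board: no cell exists, no move is ever possible
--         return 0, 0
--
--     def walk(deltas, bound):
--         pos = 0
--         for d in deltas:
--             np = pos + d
--             if -bound <= np <= bound:
--                 pos = np
--         return pos
--
--     hor = {'left': -1, 'right': 1}
--     ver = {'down': -1, 'up': 1}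
--     x = walk([hor[k] for k in keyinput if k in hor], n)
--     y = walk([ver[k] for k in keyinput if k in ver], m)
--     return x, y
-- ===== Notes on version B (the rewrite author's own statement) =====
-- stated objective: alternative
-- what changed: Instead of one loop threading the (x,y) pair through a direction dict with cross-axis range checks, B partitions the keys into horizontal and vertical delta subsequences and folds each axis independently with the same skip-if-out-of-bounds guard (with an explicit no-cell short-circuit for nonpositive board sizes).
import Mathlib
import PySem

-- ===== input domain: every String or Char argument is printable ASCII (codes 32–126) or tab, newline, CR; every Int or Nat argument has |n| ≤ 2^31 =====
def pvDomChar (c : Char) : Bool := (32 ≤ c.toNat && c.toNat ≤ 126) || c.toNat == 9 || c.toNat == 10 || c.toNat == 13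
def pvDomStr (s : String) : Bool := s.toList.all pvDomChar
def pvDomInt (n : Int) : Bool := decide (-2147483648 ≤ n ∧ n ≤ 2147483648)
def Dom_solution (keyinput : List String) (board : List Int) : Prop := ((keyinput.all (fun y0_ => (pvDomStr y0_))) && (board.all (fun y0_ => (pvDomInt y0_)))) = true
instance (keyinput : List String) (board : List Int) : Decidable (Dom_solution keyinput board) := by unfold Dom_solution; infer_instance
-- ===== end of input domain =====

-- B folds the horizontal and vertical key subsequences independently (same skip-if-out-of-range guard) instead of threading the (x,y) pair through one loop; alternative decomposition, same cost.

-- ===== PORT A =====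
def solutionMove : PySem.Dict String (Int × Int) :=
  PySem.Dict.ofList [("up", (0, 1)), ("down", (0, -1)), ("left", (-1, 0)), ("right", (1, 0))]

def solutionStep (n m : Int) (st : Int × Int) (key : String) : Int × Int :=
  match PySem.Dict.get? solutionMove key with
  | none => st        -- Python raises KeyError here; excluded by Pre_solution
  | some dxy =>
    let nx := st.1 + dxy.1
    let ny := st.2 + dxy.2
    if ¬ (-n ≤ nx ∧ nx ≤ n) then st        -- nx not in range(-n, n+1)
    else if ¬ (-m ≤ ny ∧ ny ≤ m) then st   -- ny not in range(-m, m+1)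
    else (nx, ny)

def solution (keyinput : List String) (board : List Int) : Int × Int :=
  let n := PySem.Int.floordiv ((PySem.List.pyGet? board 0).getD 0 - 1) 2
  let m := PySem.Int.floordiv ((PySem.List.pyGet? board 1).getD 0 - 1) 2
  keyinput.foldl (solutionStep n m) (0, 0)

-- ===== PORT B =====
def solutionWStep (bound pos d : Int) : Int :=
  let np := pos + d
  if -bound ≤ np ∧ np ≤ bound then np else pos

def solutionWalk (deltas : List Int) (bound : Int) : Int :=
  deltas.foldl (solutionWStep bound) 0

def solutionHor : PySem.Dict String Int := PySem.Dict.ofList [("left", -1), ("right", 1)]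
def solutionVer : PySem.Dict String Int := PySem.Dict.ofList [("down", -1), ("up", 1)]

def solution_alt (keyinput : List String) (board : List Int) : Int × Int :=
  let n := PySem.Int.floordiv ((PySem.List.pyGet? board 0).getD 0 - 1) 2
  let m := PySem.Int.floordiv ((PySem.List.pyGet? board 1).getD 0 - 1) 2
  if n < 0 ∨ m < 0 then (0, 0)
  else
    (solutionWalk (keyinput.filterMap (PySem.Dict.get? solutionHor)) n,
     solutionWalk (keyinput.filterMap (PySem.Dict.get? solutionVer)) m)

-- ===== PRECONDITION & SPEC =====
-- Pre_ excludes exactly the inputs where A raises: board shorter than 2 (IndexError) or a key outside the move dict (KeyError).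
def Pre_solution (keyinput : List String) (board : List Int) : Prop :=
  2 ≤ board.length ∧ ∀ k ∈ keyinput, k = "up" ∨ k = "down" ∨ k = "left" ∨ k = "right"
instance (keyinput : List String) (board : List Int) : Decidable (Pre_solution keyinput board) := by unfold Pre_solution; infer_instance
def pvWitness_solution : List String × List Int := (["up", "left", "left"], [3, 5])

def Spec_solution (keyinput : List String) (board : List Int) (out : Int × Int) : Prop := out = solution_alt keyinput board
instance (keyinput : List String) (board : List Int) (out : Int × Int) : Decidable (Spec_solution keyinput board out) := by unfold Spec_solution; infer_instance

-- ===== CLAIM (what is proved, stated in full; the proofs are below) =====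
def Claim_equal_solution : Prop := ∀ (keyinput : List String) (board : List Int), Dom_solution keyinput board → Pre_solution keyinput board → Spec_solution keyinput board (solution keyinput board)

-- ===== LEMMAS AND PROOFS =====

-- On a degenerate (empty) board one of the two range checks is unsatisfiable, so A's loop never moves.
lemma solution_deg (n m : Int) (h : n < 0 ∨ m < 0) (ks : List String) (st : Int × Int) :
    ks.foldl (solutionStep n m) st = st := by
  induction ks generalizing st with
  | nil => rfl
  | cons k ks ih =>
    have hstep : solutionStep n m st k = st := by
      unfold solutionStep
      cases PySem.Dict.get? solutionMove k with
      | none => rfl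
      | some dxy =>
        dsimp only
        split_ifs <;> first | rfl | (exfalso; rcases h with h | h <;> omega)
    rw [List.foldl_cons, hstep, ih]

-- Evaluating A's step on each of the four legal keys.
lemma solution_step_up (n m x y : Int) (hx1 : -n ≤ x) (hx2 : x ≤ n) :
    solutionStep n m (x, y) "up" = (x, solutionWStep m y 1) := by
  unfold solutionStep solutionWStep
  rw [show PySem.Dict.get? solutionMove "up" = some ((0 : Int), (1 : Int)) from rfl]
  dsimp only
  split_ifs <;> first | rfl | (simp only [Prod.mk.injEq, true_and, and_true]; omega)

lemma solution_step_down (n m x y : Int) (hx1 : -n ≤ x) (hx2 : x ≤ n) :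
    solutionStep n m (x, y) "down" = (x, solutionWStep m y (-1)) := by
  unfold solutionStep solutionWStep
  rw [show PySem.Dict.get? solutionMove "down" = some ((0 : Int), (-1 : Int)) from rfl]
  dsimp only
  split_ifs <;> first | rfl | (simp only [Prod.mk.injEq, true_and, and_true]; omega)

lemma solution_step_left (n m x y : Int) (hy1 : -m ≤ y) (hy2 : y ≤ m) :
    solutionStep n m (x, y) "left" = (solutionWStep n x (-1), y) := by
  unfold solutionStep solutionWStep
  rw [show PySem.Dict.get? solutionMove "left" = some ((-1 : Int), (0 : Int)) from rfl]
  dsimp only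
  split_ifs <;> first | rfl | (simp only [Prod.mk.injEq, true_and, and_true]; omega)

lemma solution_step_right (n m x y : Int) (hy1 : -m ≤ y) (hy2 : y ≤ m) :
    solutionStep n m (x, y) "right" = (solutionWStep n x 1, y) := by
  unfold solutionStep solutionWStep
  rw [show PySem.Dict.get? solutionMove "right" = some ((1 : Int), (0 : Int)) from rfl]
  dsimp only
  split_ifs <;> first | rfl | (simp only [Prod.mk.injEq, true_and, and_true]; omega)

lemma solution_wstep_bounds (bound pos d : Int) (h1 : -bound ≤ pos) (h2 : pos ≤ bound) :
    -bound ≤ solutionWStep bound pos d ∧ solutionWStep bound pos d ≤ bound := by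
  simp only [solutionWStep]
  split_ifs <;> omega

-- Main invariant: on a non-degenerate board the two axes are independent.
lemma solution_main (n m : Int) (_hn : 0 ≤ n) (_hm : 0 ≤ m) (ks : List String)
    (hk : ∀ k ∈ ks, k = "up" ∨ k = "down" ∨ k = "left" ∨ k = "right")
    (x y : Int) (hx1 : -n ≤ x) (hx2 : x ≤ n) (hy1 : -m ≤ y) (hy2 : y ≤ m) :
    ks.foldl (solutionStep n m) (x, y) =
      ((ks.filterMap (PySem.Dict.get? solutionHor)).foldl (solutionWStep n) x,
       (ks.filterMap (PySem.Dict.get? solutionVer)).foldl (solutionWStep m) y) := by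
  induction ks generalizing x y with
  | nil => rfl
  | cons k ks ih =>
    have hkt : ∀ k' ∈ ks, k' = "up" ∨ k' = "down" ∨ k' = "left" ∨ k' = "right" :=
      fun k' h' => hk k' (List.mem_cons_of_mem _ h')
    rcases hk k (List.mem_cons_self) with h | h | h | h <;> subst h <;>
      simp only [List.foldl_cons, List.filterMap_cons]
    · rw [show PySem.Dict.get? solutionHor "up" = none from rfl,
        show PySem.Dict.get? solutionVer "up" = some 1 from rfl,
        solution_step_up n m x y hx1 hx2]
      simp only [List.foldl_cons]
      obtain ⟨hb1, hb2⟩ := solution_wstep_bounds m y 1 hy1 hy2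
      exact ih hkt x _ hx1 hx2 hb1 hb2
    · rw [show PySem.Dict.get? solutionHor "down" = none from rfl,
        show PySem.Dict.get? solutionVer "down" = some (-1) from rfl,
        solution_step_down n m x y hx1 hx2]
      simp only [List.foldl_cons]
      obtain ⟨hb1, hb2⟩ := solution_wstep_bounds m y (-1) hy1 hy2
      exact ih hkt x _ hx1 hx2 hb1 hb2
    · rw [show PySem.Dict.get? solutionHor "left" = some (-1) from rfl,
        show PySem.Dict.get? solutionVer "left" = none from rfl,
        solution_step_left n m x y hy1 hy2]
      simp only [List.foldl_cons]
      obtain ⟨hb1, hb2⟩ := solution_wstep_bounds n x (-1) hx1 hx2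
      exact ih hkt _ y hb1 hb2 hy1 hy2
    · rw [show PySem.Dict.get? solutionHor "right" = some 1 from rfl,
        show PySem.Dict.get? solutionVer "right" = none from rfl,
        solution_step_right n m x y hy1 hy2]
      simp only [List.foldl_cons]
      obtain ⟨hb1, hb2⟩ := solution_wstep_bounds n x 1 hx1 hx2
      exact ih hkt _ y hb1 hb2 hy1 hy2

-- ===== VERDICT (by name: the statement is the Claim_ definition above) =====
theorem solution_spec : Claim_equal_solution := by
  intro keyinput board _ hpre
  obtain ⟨_, hkeys⟩ := hpre
  unfold Spec_solution solution solution_alt solutionWalk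
  simp only []
  set n := PySem.Int.floordiv ((PySem.List.pyGet? board 0).getD 0 - 1) 2
  set m := PySem.Int.floordiv ((PySem.List.pyGet? board 1).getD 0 - 1) 2
  by_cases hdeg : n < 0 ∨ m < 0
  · rw [if_pos hdeg, solution_deg n m hdeg]
  · rw [if_neg hdeg]
    have hn0 : 0 ≤ n := by omega
    have hm0 : 0 ≤ m := by omega
    exact solution_main n m hn0 hm0 keyinput hkeys 0 0 (by omega) hn0 (by omega) hm0
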